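-- pv_equiv track=rewrite | github.com/gregdigittal/depthfusion | src/depthfusion/mcp/server.py | _trim_to_sentence
-- ===== SOURCE A (Python) =====
-- def _trim_to_sentence(text: str, max_len: int) -> str:
--     """Trim *text* to at most *max_len* characters, preferring a sentence boundary.
--
--     Rules (applied in order):
--     1. If ``len(text) <= max_len`` return text unchanged.
--     2. Truncate to ``max_len`` characters.
--     3. Search backwards for the last sentence-ending character (``.``, ``!``,
--        ``?``, or ``\\n``) in the truncated slice.
--     4. If found **and** the break point is at least 60 % of ``max_len``
--        characters from the start (to avoid returning an overly-short result),
--        trim there (inclusive of the sentence-ending character).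
--     5. Otherwise, trim at the last space (word boundary).
--     6. Append ``…`` to indicate truncation.
--     """
--     if len(text) <= max_len:
--         return text
--
--     truncated = text[:max_len]
--
--     # Step 3 – look for last sentence boundary
--     min_pos = int(max_len * 0.6)
--     last_sentence = -1
--     for char in (".", "!", "?", "\n"):
--         pos = truncated.rfind(char)
--         if pos >= min_pos and pos > last_sentence:
--             last_sentence = pos
--
--     if last_sentence != -1:
--         return truncated[: last_sentence + 1] + "…"
--
--     # Step 5 – fall back to last word boundary
--     last_space = truncated.rfind(" ")
--     if last_space > 0:
--         return truncated[:last_space] + "…"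
--
--     # No boundary found – hard cut
--     return truncated + "…"
-- ===== SOURCE B (Python) =====
-- _TERMINATORS = {".", "!", "?", "\n"}
--
--
-- def _trim_to_sentence(text: str, max_len: int) -> str:
--     """Trim text to max_len chars, preferring a sentence boundary: single
--     backward scan instead of four separate rfind passes."""
--     if len(text) <= max_len:
--         return text
--
--     truncated = text[:max_len]
--     min_pos = int(max_len * 0.6)
--
--     last_space = -1
--     for i in range(len(truncated) - 1, -1, -1):
--         ch = truncated[i]
--         if ch in _TERMINATORS and i >= min_pos:
--             # highest sentence boundary at or past the 60% mark
--             return truncated[: i + 1] + "…"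
--         if ch == " " and last_space < 0:
--             last_space = i
--
--     if last_space > 0:
--         return truncated[:last_space] + "…"
--
--     return truncated + "…"
-- ===== Notes on version B (the rewrite author's own statement) =====
-- stated objective: alternative
-- what changed: Replaces the four separate rfind passes (one per terminator) plus a filtering max-loop and a fifth rfind for the space with a single backward scan over the truncated text that returns at the first (highest) terminator index past the 60% mark and tracks the last space along the way.
import Mathlib
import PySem

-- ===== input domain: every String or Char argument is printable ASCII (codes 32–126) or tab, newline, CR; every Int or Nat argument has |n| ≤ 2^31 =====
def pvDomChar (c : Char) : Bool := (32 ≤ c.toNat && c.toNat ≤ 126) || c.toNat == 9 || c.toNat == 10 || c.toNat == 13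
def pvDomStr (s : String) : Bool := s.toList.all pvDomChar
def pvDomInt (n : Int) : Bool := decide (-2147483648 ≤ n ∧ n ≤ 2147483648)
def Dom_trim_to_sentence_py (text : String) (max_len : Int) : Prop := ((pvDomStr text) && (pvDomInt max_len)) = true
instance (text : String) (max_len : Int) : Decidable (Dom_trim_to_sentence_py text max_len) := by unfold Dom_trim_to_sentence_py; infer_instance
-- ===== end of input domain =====

-- B replaces A's four rfind passes (plus a fifth for the space) by ONE backward scan of the
-- truncated text; same return value everywhere, objective: alternative (single-pass) decomposition.

-- ===== PORT A =====
-- int(n * 0.6): hand-ported (no float in PySem); exact for |n| ≤ 2^31, where CPython's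
-- rounding of n*0.6 never crosses an integer, so int(n*0.6) = trunc(3n/5) (checked against CPython).
def pyInt06 (n : Int) : Int := if 0 ≤ n then (3 * n) / 5 else -((3 * (-n)) / 5)

def trim_to_sentence_py (text : String) (max_len : Int) : String :=
  let cs := text.toList
  if (cs.length : Int) ≤ max_len then text
  else
    let truncated := PySem.List.slice cs none (some max_len)   -- text[:max_len]
    let min_pos := pyInt06 max_len
    -- for char in (".", "!", "?", "\n"): pos = truncated.rfind(char); …
    let last_sentence :=
      [('.' : Char), '!', '?', '\n'].foldl
        (fun last c =>
          let pos := PySem.Chars.rfind truncated [c]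
          if min_pos ≤ pos ∧ last < pos then pos else last) (-1)
    if last_sentence ≠ -1 then
      String.ofList (PySem.List.slice truncated none (some (last_sentence + 1)) ++ ['…'])
    else
      let last_space := PySem.Chars.rfind truncated [' ']
      if 0 < last_space then
        String.ofList (PySem.List.slice truncated none (some last_space) ++ ['…'])
      else
        String.ofList (truncated ++ ['…'])

-- ===== PORT B =====
def bTerm (c : Char) : Bool := (c == '.' || c == '!') || (c == '?' || c == '\n')   -- ch in _TERMINATORS

-- for i in range(len(truncated)-1, -1, -1): … (early return = .inl, fall-through last_space = .inr)
def bScan (truncated : List Char) (min_pos : Int) : Nat → Int → String ⊕ Int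
  | 0, last_space => .inr last_space
  | i + 1, last_space =>
    let ch := truncated.getD i ' '
    if bTerm ch ∧ min_pos ≤ (i : Int) then
      .inl (String.ofList (PySem.List.slice truncated none (some ((i : Int) + 1)) ++ ['…']))
    else
      bScan truncated min_pos i (if ch == ' ' && decide (last_space < 0) then (i : Int) else last_space)

def trim_to_sentence_py_alt (text : String) (max_len : Int) : String :=
  let cs := text.toList
  if (cs.length : Int) ≤ max_len then text
  else
    let truncated := PySem.List.slice cs none (some max_len)
    let min_pos := pyInt06 max_len
    match bScan truncated min_pos truncated.length (-1) with
    | .inl out => out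
    | .inr last_space =>
      if 0 < last_space then
        String.ofList (PySem.List.slice truncated none (some last_space) ++ ['…'])
      else
        String.ofList (truncated ++ ['…'])

-- ===== PRECONDITION & SPEC =====
def Spec_trim_to_sentence_py (text : String) (max_len : Int) (out : String) : Prop := out = trim_to_sentence_py_alt text max_len
instance (text : String) (max_len : Int) (out : String) : Decidable (Spec_trim_to_sentence_py text max_len out) := by unfold Spec_trim_to_sentence_py; infer_instance

-- ===== CLAIM (what is proved, stated in full; the proofs are below) =====
def Claim_equal_trim_to_sentence_py : Prop := ∀ (text : String) (max_len : Int), Dom_trim_to_sentence_py text max_len → Spec_trim_to_sentence_py text max_len (trim_to_sentence_py text max_len)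

-- ===== LEMMAS AND PROOFS =====

-- index of the last character satisfying P, or -1 (common characterisation of both loops)
def lastWith (P : Char → Bool) : List Char → Int
  | [] => -1
  | c :: cs =>
    if 0 ≤ lastWith P cs then lastWith P cs + 1 else if P c then 0 else -1

theorem neg_one_le_lastWith (P : Char → Bool) (cs : List Char) : -1 ≤ lastWith P cs := by
  induction cs with
  | nil => simp [lastWith]
  | cons c cs ih => simp only [lastWith]; split_ifs <;> omega

theorem lastWith_lt_length (P : Char → Bool) (cs : List Char) : lastWith P cs < cs.length := by
  induction cs with
  | nil => simp [lastWith]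
  | cons c cs ih => simp only [lastWith, List.length_cons]; split_ifs <;> push_cast <;> omega

theorem lastWith_append_singleton (P : Char → Bool) (xs : List Char) (c : Char) :
    lastWith P (xs ++ [c]) = if P c then (xs.length : Int) else lastWith P xs := by
  induction xs with
  | nil => simp [lastWith]
  | cons x xs ih =>
    simp only [List.cons_append, lastWith, ih, List.length_cons]
    have := neg_one_le_lastWith P xs
    split_ifs <;> push_cast <;> omega

theorem lastWith_or (P Q : Char → Bool) (cs : List Char) :
    lastWith (fun c => P c || Q c) cs = max (lastWith P cs) (lastWith Q cs) := by
  induction cs with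
  | nil => simp [lastWith]
  | cons c cs ih =>
    have hP := neg_one_le_lastWith P cs
    have hQ := neg_one_le_lastWith Q cs
    simp only [lastWith, ih, Bool.or_eq_true]
    split_ifs <;> first | omega | simp_all

-- rfind for a single-character needle is lastWith
theorem rfind_go_eq (cs : List Char) (c : Char) :
    ∀ k, k ≤ cs.length →
      PySem.Chars.rfind.go cs [c] k = lastWith (fun x => x == c) (cs.take (k + 1)) := by
  intro k
  induction k with
  | zero =>
    intro _
    cases cs with
    | nil => simp [PySem.Chars.rfind.go, List.isPrefixOf, lastWith]
    | cons y ys =>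
      simp only [PySem.Chars.rfind.go, List.take_add_one, List.take_zero, List.nil_append]
      by_cases h : c = y
      · subst h; simp [List.isPrefixOf, lastWith]
      · have h1 : (c == y) = false := by simp [h]
        have h2 : (y == c) = false := by simp [Ne.symm h]
        simp [List.isPrefixOf, lastWith, h1, h2]
  | succ j ih =>
    intro hk
    have hj : j < cs.length := by omega
    have hstep : PySem.Chars.rfind.go cs [c] (j + 1) =
        if [c].isPrefixOf (cs.drop (j + 1)) then ((j : Int) + 1) else PySem.Chars.rfind.go cs [c] j := by
      simp [PySem.Chars.rfind.go]
    rw [hstep, ih (by omega)]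
    by_cases hlen : j + 1 < cs.length
    · have htake : cs.take (j + 1 + 1) = cs.take (j + 1) ++ [cs[j + 1]] := by
        rw [List.take_add_one]
        simp [List.getElem?_eq_getElem hlen]
      rw [htake, lastWith_append_singleton]
      have hdrop : cs.drop (j + 1) = cs[j + 1] :: cs.drop (j + 2) := by
        rw [List.drop_eq_getElem_cons hlen]
      rw [hdrop]
      have hlentake : ((cs.take (j + 1)).length : Int) = (j : Int) + 1 := by
        simp [List.length_take]; omega
      by_cases h : c = cs[j + 1]
      · rw [← h]; simp [List.isPrefixOf]; omega
      · have h1 : (c == cs[j + 1]) = false := by simp [h]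
        have h2 : (cs[j + 1] == c) = false := by simp [Ne.symm h]
        simp [List.isPrefixOf, h1, h2]
    · have hj1 : j + 1 = cs.length := by omega
      have hdrop : cs.drop (j + 1) = [] := by simp [hj1]
      have htake : cs.take (j + 1 + 1) = cs.take (j + 1) := by
        rw [List.take_of_length_le (by omega), List.take_of_length_le (by omega)]
      simp [hdrop, htake]

theorem rfind_singleton (cs : List Char) (c : Char) :
    PySem.Chars.rfind cs [c] = lastWith (fun x => x == c) cs := by
  have h := rfind_go_eq cs c cs.length (le_refl _)
  rw [List.take_of_length_le (by omega)] at h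
  simpa [PySem.Chars.rfind] using h

-- the single backward scan, characterised
theorem bScan_eq (cs : List Char) (mp : Int) :
    ∀ k, k ≤ cs.length → ∀ sp : Int, (sp = -1 ∨ 0 ≤ sp) →
      bScan cs mp k sp =
        if mp ≤ lastWith bTerm (cs.take k) ∧ 0 ≤ lastWith bTerm (cs.take k) then
          .inl (String.ofList (PySem.List.slice cs none (some (lastWith bTerm (cs.take k) + 1)) ++ ['…']))
        else
          .inr (if 0 ≤ sp then sp else lastWith (fun x => x == ' ') (cs.take k)) := by
  intro k
  induction k with
  | zero =>
    intro _ sp hsp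
    have : ¬ (mp ≤ lastWith bTerm (cs.take 0) ∧ 0 ≤ lastWith bTerm (cs.take 0)) := by
      simp [lastWith]
    simp only [bScan, List.take_zero]
    rcases hsp with h | h <;> simp [lastWith, h]
  | succ j ih =>
    intro hk sp hsp
    have hj : j < cs.length := by omega
    have htake : cs.take (j + 1) = cs.take j ++ [cs[j]] := by
      rw [List.take_add_one]; simp [List.getElem?_eq_getElem hj]
    have hget : cs.getD j ' ' = cs[j] := List.getD_eq_getElem cs ' ' hj
    have hlentake : ((cs.take j).length : Int) = (j : Int) := by
      simp [List.length_take]; omega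
    have hlt := lastWith_lt_length bTerm (cs.take j)
    have hle := neg_one_le_lastWith bTerm (cs.take j)
    rw [hlentake] at hlt
    simp only [bScan, hget]
    by_cases hterm : bTerm cs[j]
    · by_cases hmp : mp ≤ (j : Int)
      · rw [if_pos ⟨hterm, hmp⟩]
        rw [htake, lastWith_append_singleton, if_pos hterm, hlentake]
        rw [if_pos ⟨hmp, by omega⟩]
      · rw [if_neg (by tauto)]
        have hsp' : (cs[j] == ' ') = false := by
          have hne : cs[j] ≠ ' ' := by
            intro he; rw [he] at hterm; simp [bTerm] at hterm
          simp [hne]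
        rw [hsp', Bool.false_and, if_neg (by simp)]
        rw [ih (by omega) sp hsp]
        rw [htake, lastWith_append_singleton, if_pos hterm, hlentake,
            lastWith_append_singleton, hsp']
        have hc1 : ¬ (mp ≤ lastWith bTerm (List.take j cs) ∧ 0 ≤ lastWith bTerm (List.take j cs)) := by omega
        have hc2 : ¬ (mp ≤ (j : Int) ∧ 0 ≤ (j : Int)) := by omega
        simp [hc1]; omega
    · rw [if_neg (by tauto)]
      have hsp2 : (if (cs[j] == ' ') && decide (sp < 0) then ((j : Nat) : Int) else sp) = -1 ∨
          0 ≤ (if (cs[j] == ' ') && decide (sp < 0) then ((j : Nat) : Int) else sp) := by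
        split_ifs <;> omega
      rw [ih (by omega) _ hsp2]
      rw [htake, lastWith_append_singleton (P := bTerm), if_neg hterm,
          lastWith_append_singleton (P := fun x => x == ' ')]
      by_cases hcond : mp ≤ lastWith bTerm (List.take j cs) ∧ 0 ≤ lastWith bTerm (List.take j cs)
      · rw [if_pos hcond, if_pos hcond]
      · rw [if_neg hcond, if_neg hcond, hlentake]
        by_cases hspace : (cs[j] == ' ') = true <;>
          rcases hsp with h0 | h0 <;>
            simp only [hspace, h0, Bool.true_and, Bool.false_and] <;>
              split_ifs <;> simp_all; omega

-- A's four-rfind filtering loop, characterised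
theorem foldA (cs : List Char) (mp : Int) :
    ([('.' : Char), '!', '?', '\n'].foldl
        (fun last c =>
          let pos := PySem.Chars.rfind cs [c]
          if mp ≤ pos ∧ last < pos then pos else last) (-1))
      = if mp ≤ lastWith bTerm cs ∧ 0 ≤ lastWith bTerm cs then lastWith bTerm cs else -1 := by
  have hM : lastWith bTerm cs =
      max (max (lastWith (fun x => x == '.') cs) (lastWith (fun x => x == '!') cs))
          (max (lastWith (fun x => x == '?') cs) (lastWith (fun x => x == '\n') cs)) := by
    rw [← lastWith_or, ← lastWith_or, ← lastWith_or]; rfl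
  have h1 := neg_one_le_lastWith (fun x => x == '.') cs
  have h2 := neg_one_le_lastWith (fun x => x == '!') cs
  have h3 := neg_one_le_lastWith (fun x => x == '?') cs
  have h4 := neg_one_le_lastWith (fun x => x == '\n') cs
  simp only [List.foldl, rfind_singleton, hM]
  split_ifs <;> omega

-- ===== VERDICT (by name: the statement is the Claim_ definition above) =====
theorem trim_to_sentence_py_spec : Claim_equal_trim_to_sentence_py := by
  intro text max_len _
  unfold Spec_trim_to_sentence_py trim_to_sentence_py trim_to_sentence_py_alt
  by_cases h : ((text.toList.length : Int) ≤ max_len)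
  · rw [if_pos h, if_pos h]
  · rw [if_neg h, if_neg h]
    dsimp only
    rw [foldA, bScan_eq _ _ _ (le_refl _) (-1) (Or.inl rfl)]
    rw [List.take_of_length_le (le_refl _)]
    by_cases hc : pyInt06 max_len ≤ lastWith bTerm (PySem.List.slice text.toList none (some max_len)) ∧
        0 ≤ lastWith bTerm (PySem.List.slice text.toList none (some max_len))
    · rw [if_pos hc, if_pos hc, if_pos (by omega)]
    · rw [if_neg hc, if_neg hc, if_neg (by omega)]
      rw [rfind_singleton]
      norm_num
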